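-- pv_equiv track=rewrite | github.com/yamlr/yamlr | src/akeso/cli/commands/base.py | normalize_paths
-- ===== SOURCE A (Python) =====
-- def normalize_paths(raw_paths):
--     """
--     Flattens a list of paths that might contain split commas.
--     Example: ["f1,f2", "f3"] -> ["f1", "f2", "f3"]
--     """
--     if not raw_paths:
--         return []
--
--     normalized = []
--     for p in raw_paths:
--         for sub in p.split(","):
--             clean = sub.strip()
--             if clean:
--                 normalized.append(clean)
--     return normalized
-- ===== SOURCE B (Python) =====
-- def normalize_paths(raw_paths):
--     """
--     Flattens a list of paths that might contain split commas.
--     Example: ["f1,f2", "f3"] -> ["f1", "f2", "f3"]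
--
--     Single character-level scan: no split()/strip() calls.  A token buffer is
--     built character by character; a comma (or end of string) flushes it; leading
--     whitespace is never buffered and interior whitespace is held pending until
--     the next non-space character, so trailing whitespace is dropped for free.
--     """
--     out = []
--     for s in raw_paths:
--         buf = []            # current token, stripped on the fly
--         pend = []           # whitespace seen after buf, kept only if more text follows
--         for c in s:
--             if c == ',':
--                 if buf:
--                     out.append(''.join(buf))
--                 buf = []
--                 pend = []
--             elif c.isspace():
--                 if buf:
--                     pend.append(c)
--             else:
--                 buf.extend(pend)
--                 pend = []
--                 buf.append(c)
--         if buf: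
--             out.append(''.join(buf))
--     return out
-- ===== Notes on version B (the rewrite author's own statement) =====
-- stated objective: alternative
-- what changed: Replaces A's split-then-strip-then-filter pipeline with a single character-level state machine that builds each token in a buffer, flushes on commas, never buffers leading whitespace and holds interior whitespace pending, so no intermediate split/strip lists are ever built.
import Mathlib
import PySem

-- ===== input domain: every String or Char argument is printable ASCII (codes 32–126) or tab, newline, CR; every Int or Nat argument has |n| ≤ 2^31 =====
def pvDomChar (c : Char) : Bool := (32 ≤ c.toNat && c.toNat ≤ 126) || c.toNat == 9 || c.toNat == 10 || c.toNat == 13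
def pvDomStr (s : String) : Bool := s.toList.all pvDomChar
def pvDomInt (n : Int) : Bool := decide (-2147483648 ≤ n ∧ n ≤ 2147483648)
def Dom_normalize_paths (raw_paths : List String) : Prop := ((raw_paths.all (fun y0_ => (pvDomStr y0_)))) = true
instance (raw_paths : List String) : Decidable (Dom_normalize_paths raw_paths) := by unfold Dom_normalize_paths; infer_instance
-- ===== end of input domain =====

-- B replaces A's split/strip/filter pipeline by a single character-level state machine
-- (token buffer flushed on commas, whitespace held pending); alternative decomposition, equal cost.

-- ===== PORT A =====
-- literal port of A: guard on the empty list, then nested loops appending stripped non-empty pieces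
def normalize_paths (raw_paths : List String) : List String :=
  if raw_paths = [] then []
  else
    raw_paths.foldl (fun normalized p =>
      (PySem.Chars.splitOn p.toList [',']).foldl (fun normalized sub =>
        let clean := PySem.Chars.strip sub
        if clean ≠ [] then normalized ++ [String.ofList clean] else normalized) normalized) []

-- ===== PORT B =====
-- literal port of Source B's inner loop body: state (out, buf, pend), one step per character
def npStep (st : List String × List Char × List Char) (c : Char) :
    List String × List Char × List Char :=
  let (out, buf, pend) := st
  if c = ',' then
    ((if buf ≠ [] then out ++ [String.ofList buf] else out), [], [])
  else if PySem.Chars.isspace c then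
    (out, buf, if buf ≠ [] then pend ++ [c] else pend)
  else
    (out, buf ++ pend ++ [c], [])

-- literal port of Source B: per string, fold the scanner over its characters, then flush the buffer
def normalize_paths_alt (raw_paths : List String) : List String :=
  raw_paths.foldl (fun out s =>
    let st := s.toList.foldl npStep (out, [], [])
    if st.2.1 ≠ [] then st.1 ++ [String.ofList st.2.1] else st.1) []

-- ===== PRECONDITION & SPEC =====
def Spec_normalize_paths (raw_paths : List String) (out : List String) : Prop := out = normalize_paths_alt raw_paths
instance (raw_paths : List String) (out : List String) : Decidable (Spec_normalize_paths raw_paths out) := by unfold Spec_normalize_paths; infer_instance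

-- ===== CLAIM (what is proved, stated in full; the proofs are below) =====
def Claim_equal_normalize_paths : Prop := ∀ (raw_paths : List String), Dom_normalize_paths raw_paths → Spec_normalize_paths raw_paths (normalize_paths raw_paths)

-- ===== LEMMAS AND PROOFS =====

-- structural model of Python's split(",") with an accumulator for the current piece
def sp : List Char → List Char → List (List Char)
  | [], cur => [cur.reverse]
  | c :: rest, cur => if c = ',' then cur.reverse :: sp rest [] else sp rest (c :: cur)

theorem go_eq (fuel : Nat) (l cur : List Char) (acc : List (List Char)) (h : l.length < fuel) :
    PySem.Chars.splitOn.go [','] fuel l cur acc = acc.reverse ++ sp l cur := by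
  induction fuel generalizing l cur acc with
  | zero => omega
  | succ n ih =>
    cases l with
    | nil => rw [PySem.Chars.splitOn.go.eq_def]; simp [sp]
    | cons c rest =>
      rw [PySem.Chars.splitOn.go.eq_def]
      by_cases hc : c = ','
      · subst hc
        simp only [List.isPrefixOf, BEq.rfl, Bool.true_and, if_pos]
        rw [ih _ _ _ (by simp at h ⊢; omega)]
        simp [sp]
      · simp only [List.isPrefixOf, Bool.and_true]
        rw [if_neg (by simp [hc, BEq.comm])]
        rw [ih rest (c :: cur) acc (by simp at h ⊢; omega)]
        simp [sp, hc]

theorem splitOn_eq_sp (s : List Char) : PySem.Chars.splitOn s [','] = sp s [] := by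
  have := go_eq (s.length + 1) s [] [] (by omega)
  simpa [PySem.Chars.splitOn] using this

-- the per-piece processing A applies: strip, drop empties, repackage as strings
def proc (pieces : List (List Char)) : List String :=
  ((pieces.map PySem.Chars.strip).filter (· ≠ [])).map String.ofList

theorem inner_foldl_eq (pieces : List (List Char)) : ∀ (acc : List String),
    pieces.foldl (fun normalized sub =>
      let clean := PySem.Chars.strip sub
      if clean ≠ [] then normalized ++ [String.ofList clean] else normalized) acc
      = acc ++ proc pieces := by
  induction pieces with
  | nil => intro acc; simp [proc]
  | cons x xs ih =>
    intro acc
    rw [List.foldl_cons, ih]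
    by_cases hx : PySem.Chars.strip x = []
    · simp [proc, hx]
    · simp [proc, hx]

theorem outer_foldl_eq (l : List String) : ∀ (acc : List String),
    l.foldl (fun normalized p =>
      (PySem.Chars.splitOn p.toList [',']).foldl (fun normalized sub =>
        let clean := PySem.Chars.strip sub
        if clean ≠ [] then normalized ++ [String.ofList clean] else normalized) normalized) acc
      = acc ++ l.flatMap (fun p => proc (sp p.toList [])) := by
  induction l with
  | nil => intro acc; simp
  | cons p ps ih =>
    intro acc
    rw [List.foldl_cons, inner_foldl_eq, splitOn_eq_sp, ih]
    simp

-- the tokens B's scanner emits from state (buf, pend) while reading the remaining characters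
def tokens : List Char → List Char → List Char → List String
  | [], buf, _ => if buf ≠ [] then [String.ofList buf] else []
  | c :: rest, buf, pend =>
    if c = ',' then (if buf ≠ [] then [String.ofList buf] else []) ++ tokens rest [] []
    else if PySem.Chars.isspace c then
      tokens rest buf (if buf ≠ [] then pend ++ [c] else pend)
    else tokens rest (buf ++ pend ++ [c]) []

theorem foldl_npStep_eq (l : List Char) : ∀ (out : List String) (buf pend : List Char),
    (let st := l.foldl npStep (out, buf, pend);
     if st.2.1 ≠ [] then st.1 ++ [String.ofList st.2.1] else st.1)
      = out ++ tokens l buf pend := by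
  induction l with
  | nil =>
    intro out buf pend
    by_cases hb : buf = [] <;> simp [tokens, hb]
  | cons c rest ih =>
    intro out buf pend
    by_cases hc : c = ','
    · subst hc
      by_cases hb : buf = [] <;>
        simp [npStep, tokens, hb, ih, List.append_assoc]
    · by_cases hw : PySem.Chars.isspace c
      · by_cases hb : buf = [] <;>
          simp [npStep, tokens, hc, hw, hb, ih]
      · simp [npStep, tokens, hc, hw, ih]

theorem alt_foldl_eq (l : List String) (acc : List String) :
    l.foldl (fun out s =>
      let st := s.toList.foldl npStep (out, [], [])
      if st.2.1 ≠ [] then st.1 ++ [String.ofList st.2.1] else st.1) acc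
      = acc ++ l.flatMap (fun s => tokens s.toList [] []) := by
  simp only [foldl_npStep_eq]
  exact PySem.List.foldl_append_eq_flatMap _ l acc

-- whitespace-boundary facts about lstrip/rstrip/strip used by the invariant below
theorem lstrip_append_one (x : List Char) (c : Char) :
    PySem.Chars.lstrip (x ++ [c])
      = if PySem.Chars.lstrip x = [] then PySem.Chars.lstrip [c]
        else PySem.Chars.lstrip x ++ [c] := by
  simp [PySem.Chars.lstrip, List.dropWhile_append, List.isEmpty_iff]

theorem rstrip_append_ws (x : List Char) (c : Char) (hw : PySem.Chars.isspace c = true) :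
    PySem.Chars.rstrip (x ++ [c]) = PySem.Chars.rstrip x := by
  simp [PySem.Chars.rstrip, hw]

theorem rstrip_append_nonws (x : List Char) (c : Char) (hw : PySem.Chars.isspace c = false) :
    PySem.Chars.rstrip (x ++ [c]) = x ++ [c] := by
  simp [PySem.Chars.rstrip, hw]

theorem rstrip_prefix (x : List Char) : PySem.Chars.rstrip x <+: x := by
  have h : List.dropWhile PySem.Chars.isspace x.reverse <:+ x.reverse :=
    List.dropWhile_suffix _
  have := h.reverse
  simpa [PySem.Chars.rstrip] using this

theorem strip_eq_nil_iff (x : List Char) :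
    PySem.Chars.strip x = [] ↔ PySem.Chars.lstrip x = [] := by
  constructor
  · intro h
    by_contra hne
    rcases List.exists_cons_of_ne_nil hne with ⟨d, t, ht⟩
    have hd : PySem.Chars.isspace d = false := by
      have := List.head?_dropWhile_not (p := PySem.Chars.isspace) (l := x)
      simp [PySem.Chars.lstrip] at ht
      rw [ht] at this
      simpa using this
    have : PySem.Chars.rstrip (d :: t) ≠ [] := by
      intro hr
      -- rstrip keeps the head nonspace char: dropWhile on reverse ends before d
      have : (List.dropWhile PySem.Chars.isspace (d :: t).reverse).reverse = [] := hr
      have h2 : List.dropWhile PySem.Chars.isspace (t.reverse ++ [d]) = [] := by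
        simpa using congrArg List.reverse this
      rw [List.dropWhile_append] at h2
      by_cases he : (List.dropWhile PySem.Chars.isspace t.reverse).isEmpty
      · simp [he, hd] at h2
      · simp [he] at h2
    exact this (by simpa [PySem.Chars.strip, ht] using h)
  · intro h; simp [PySem.Chars.strip, h, PySem.Chars.rstrip]

-- pending whitespace after the on-the-fly-stripped buffer: what of lstrip is beyond strip
def pendOf (raw : List Char) : List Char :=
  (PySem.Chars.lstrip raw).drop (PySem.Chars.strip raw).length

theorem strip_append_pendOf (raw : List Char) :
    PySem.Chars.strip raw ++ pendOf raw = PySem.Chars.lstrip raw := by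
  have h : PySem.Chars.strip raw <+: PySem.Chars.lstrip raw := rstrip_prefix _
  rcases h with ⟨t, ht⟩
  simp [pendOf, ← ht]

-- the central invariant: B's scanner from the state derived from raw chars
-- computes exactly A's per-piece processing of the raw split
theorem tokens_eq_proc (l : List Char) : ∀ (raw : List Char),
    tokens l (PySem.Chars.strip raw) (pendOf raw) = proc (sp l raw.reverse) := by
  induction l with
  | nil =>
    intro raw
    by_cases h : PySem.Chars.strip raw = [] <;> simp [tokens, sp, proc, h]
  | cons c rest ih =>
    intro raw
    by_cases hc : c = ','
    · subst hc
      have h0 := ih []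
      simp [PySem.Chars.strip, PySem.Chars.lstrip, PySem.Chars.rstrip, pendOf] at h0
      by_cases h : PySem.Chars.strip raw = [] <;>
        simp [tokens, sp, proc, h, h0]
    · by_cases hw : PySem.Chars.isspace c
      · -- whitespace char: strip unchanged, pend grows iff buf nonempty
        have hstrip : PySem.Chars.strip (raw ++ [c]) = PySem.Chars.strip raw := by
          unfold PySem.Chars.strip
          by_cases hl : PySem.Chars.lstrip raw = []
          · have h1 : PySem.Chars.lstrip (raw ++ [c]) = [] := by
              rw [lstrip_append_one, if_pos hl]
              simp [PySem.Chars.lstrip, hw]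
            rw [h1, hl]
          · rw [lstrip_append_one, if_neg hl, rstrip_append_ws _ _ hw]
        have h := ih (raw ++ [c])
        rw [hstrip] at h
        by_cases hb : PySem.Chars.strip raw = []
        · -- buf empty: lstrip raw = [], so pendOf raw = [] and pendOf (raw++[c]) = []
          have hl : PySem.Chars.lstrip raw = [] := (strip_eq_nil_iff raw).mp hb
          have hp : pendOf raw = [] := by simp [pendOf, hl]
          have hl' : PySem.Chars.lstrip (raw ++ [c]) = [] := by
            rw [lstrip_append_one, if_pos hl]; simp [PySem.Chars.lstrip, hw]
          have hp' : pendOf (raw ++ [c]) = [] := by simp [pendOf, hl']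
          rw [hp'] at h
          simpa [tokens, hc, hw, hb, sp, hp] using h
        · -- buf nonempty: pendOf (raw++[c]) = pendOf raw ++ [c]
          have hl : PySem.Chars.lstrip raw ≠ [] := fun h' =>
            hb ((strip_eq_nil_iff raw).mpr h')
          have hp' : pendOf (raw ++ [c]) = pendOf raw ++ [c] := by
            have hpre : PySem.Chars.strip raw <+: PySem.Chars.lstrip raw := rstrip_prefix _
            have hlen : (PySem.Chars.strip raw).length ≤ (PySem.Chars.lstrip raw).length :=
              hpre.length_le
            simp [pendOf, lstrip_append_one, hl, hstrip,
              List.drop_append_of_le_length hlen]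
          rw [hp'] at h
          simpa [tokens, hc, hw, hb, sp] using h
      · -- non-space char: new buf = strip raw ++ pendOf raw ++ [c] = strip (raw ++ [c]), pend = []
        have hlstrip : PySem.Chars.lstrip (raw ++ [c])
            = PySem.Chars.lstrip raw ++ [c] := by
          rw [lstrip_append_one]
          by_cases hl : PySem.Chars.lstrip raw = [] <;>
            simp [PySem.Chars.lstrip, hw]
        have hstrip : PySem.Chars.strip (raw ++ [c])
            = PySem.Chars.strip raw ++ pendOf raw ++ [c] := by
          have h0 : PySem.Chars.strip (raw ++ [c])
              = PySem.Chars.rstrip (PySem.Chars.lstrip (raw ++ [c])) := rfl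
          rw [h0, hlstrip, rstrip_append_nonws _ _ (by simpa using hw),
            ← strip_append_pendOf raw]
        have hp' : pendOf (raw ++ [c]) = [] := by
          rw [pendOf, hlstrip, hstrip]
          have hlen := congrArg List.length (strip_append_pendOf raw)
          simp [List.drop_eq_nil_iff] at hlen ⊢
          omega
        have h := ih (raw ++ [c])
        rw [hstrip, hp'] at h
        simpa [tokens, hc, hw, sp] using h

theorem tokens_eq_proc_nil (l : List Char) : tokens l [] [] = proc (sp l []) := by
  have h := tokens_eq_proc l []
  simpa [PySem.Chars.strip, PySem.Chars.lstrip, PySem.Chars.rstrip, pendOf] using h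

-- ===== VERDICT (by name: the statement is the Claim_ definition above) =====
theorem normalize_paths_spec : Claim_equal_normalize_paths := by
  intro raw_paths _
  unfold Spec_normalize_paths normalize_paths normalize_paths_alt
  cases raw_paths with
  | nil => simp
  | cons p ps =>
    rw [if_neg (by simp), outer_foldl_eq, alt_foldl_eq]
    simp [tokens_eq_proc_nil]
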